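-- pv_equiv track=rewrite | github.com/lymchgmk/Algorithm-Problem-Solving | 알고리즘 재활 훈련_20201201/3주차/20058_마법사 상어와 파이어스톰.py | firestorm
-- ===== SOURCE A (Python) =====
-- def firestorm(ice_area, n, how_many_fs, divide_len):
--     def divide_and_rotate(dl):
--         L = 2**dl
--         rotated_ice_area = [[0]*(2**n) for _ in range(2**n)]
--         for i in range(0, 2**n, L):
--             for j in range(0, 2**n, L):
--                 for r in range(L):
--                     for c in range(L):
--                         rotated_ice_area[i+c][j+L-1-r] = ice_area[i+r][j+c]
--
--         return rotated_ice_area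
--
--
--     def melt(rotated_ice_area):
--         dirs = ((1, 0), (-1, 0), (0, 1), (0, -1))
--         melt_target = [[0]*(2**n) for _ in range(2**n)]
--         for x in range(2**n):
--             for y in range(2**n):
--                 for d in dirs:
--                     nx, ny = x+d[0], y+d[1]
--                     if 0<=nx<2**n and 0<=ny<2**n and rotated_ice_area[nx][ny]:
--                         melt_target[x][y] += 1
--
--         for x in range(2**n):
--             for y in range(2**n):
--                 if melt_target[x][y] < 3 and rotated_ice_area[x][y]:
--                     rotated_ice_area[x][y] -= 1
--
--         return rotated_ice_area
--
--
--     for dl in divide_len: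
--         ice_area = melt(divide_and_rotate(dl))
--
--     return ice_area
-- ===== SOURCE B (Python) =====
-- def firestorm(ice_area, n, how_many_fs, divide_len):
--     # Sparse representation: only the nonzero (ice-holding) cells are kept in a
--     # dict keyed by coordinate; a round rotates by mapping each key forward
--     # through the block permutation and melts by membership counts in the dict,
--     # and the dense grid is materialised once at the end.
--     if not divide_len:
--         return ice_area
--     size = 2 ** n
--     cells = {(x, y): ice_area[x][y]
--              for x in range(size) for y in range(size) if ice_area[x][y]}
--     for dl in divide_len:
--         L = 2 ** dl
--         rot = {(x // L * L + y % L, y // L * L + L - 1 - x % L): v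
--                for (x, y), v in cells.items()}
--         melted = (((x, y),
--                    v - 1 if sum(q in rot for q in ((x + 1, y), (x - 1, y), (x, y + 1), (x, y - 1))) < 3 else v)
--                   for (x, y), v in rot.items())
--         cells = {p: w for p, w in melted if w}
--     return [[cells.get((x, y), 0) for y in range(size)] for x in range(size)]
-- ===== Notes on version B (the rewrite author's own statement) =====
-- stated objective: alternative
-- what changed: B replaces A's dense grids (a fresh 2^n x 2^n matrix copied per rotation plus a full neighbour-count matrix per melt) by a sparse dict holding only the nonzero cells: each round maps every stored coordinate forward through the block permutation and melts by dict-membership counts of the four neighbours, and the dense grid is materialised only once at the end.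
import Mathlib
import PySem

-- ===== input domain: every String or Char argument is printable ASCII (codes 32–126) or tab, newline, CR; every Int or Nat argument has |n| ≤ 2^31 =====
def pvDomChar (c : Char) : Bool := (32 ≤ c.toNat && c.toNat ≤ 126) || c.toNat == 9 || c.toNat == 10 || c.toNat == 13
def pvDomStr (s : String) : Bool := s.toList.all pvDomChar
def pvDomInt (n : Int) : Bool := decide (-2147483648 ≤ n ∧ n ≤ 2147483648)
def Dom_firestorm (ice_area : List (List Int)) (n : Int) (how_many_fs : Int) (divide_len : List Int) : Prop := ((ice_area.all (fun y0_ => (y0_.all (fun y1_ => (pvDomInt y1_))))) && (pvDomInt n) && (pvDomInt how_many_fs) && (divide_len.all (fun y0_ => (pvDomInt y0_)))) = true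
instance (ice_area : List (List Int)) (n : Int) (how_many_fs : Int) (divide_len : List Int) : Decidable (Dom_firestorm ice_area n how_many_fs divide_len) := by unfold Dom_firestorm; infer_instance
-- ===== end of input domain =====

-- B keeps only the nonzero (ice-holding) cells in a dict keyed by coordinate: a round
-- rotates by mapping each key forward through the block permutation and melts by
-- membership counts in that dict, materialising the dense grid only once at the end
-- (objective: alternative — a sparse data structure instead of A's dense grid copies).

-- shared primitive helpers: 2**m, and Python grid indexing g[i][j] / g[i][j] = v
-- (total forms; used only under Pre_, where every index is in range)
def pow2 (m : Int) : Int := (2 : Int) ^ m.toNat   -- 2**m; exact for 0 ≤ m (Pre_ guarantees this where it is reached)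
def gget (g : List (List Int)) (i j : Int) : Int := PySem.List.pyGetD (PySem.List.pyGetD g i []) j 0
def gset (g : List (List Int)) (i j : Int) (v : Int) : List (List Int) :=
  PySem.List.pySetD g i (PySem.List.pySetD (PySem.List.pyGetD g i []) j v)

-- ===== PORT A =====
-- [[0]*(2**n) for _ in range(2**n)]
def zeroGrid (size : Int) : List (List Int) :=
  (PySem.List.pyRange 0 size 1).map (fun _ => PySem.List.pyRepeat [(0 : Int)] size)

-- def divide_and_rotate(dl) — closes over the current ice_area and n
def divideAndRotate (n : Int) (area : List (List Int)) (dl : Int) : List (List Int) :=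
  let L := pow2 dl
  (PySem.List.pyRange 0 (pow2 n) L).foldl (fun g i =>
    (PySem.List.pyRange 0 (pow2 n) L).foldl (fun g j =>
      (PySem.List.pyRange 0 L 1).foldl (fun g r =>
        (PySem.List.pyRange 0 L 1).foldl (fun g c =>
          gset g (i + c) (j + L - 1 - r) (gget area (i + r) (j + c))) g) g) g)
    (zeroGrid (pow2 n))

-- def melt(rotated_ice_area) — closes over n
def meltPy (n : Int) (rot : List (List Int)) : List (List Int) :=
  let size := pow2 n
  let dirs : List (Int × Int) := [(1, 0), (-1, 0), (0, 1), (0, -1)]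
  let tgt := (PySem.List.pyRange 0 size 1).foldl (fun t x =>
    (PySem.List.pyRange 0 size 1).foldl (fun t y =>
      dirs.foldl (fun t d =>
        if 0 ≤ x + d.1 ∧ x + d.1 < size ∧ 0 ≤ y + d.2 ∧ y + d.2 < size ∧ gget rot (x + d.1) (y + d.2) ≠ 0
        then gset t x y (gget t x y + 1) else t) t) t) (zeroGrid size)
  (PySem.List.pyRange 0 size 1).foldl (fun g x =>
    (PySem.List.pyRange 0 size 1).foldl (fun g y =>
      if gget tgt x y < 3 ∧ gget g x y ≠ 0 then gset g x y (gget g x y - 1) else g) g) rot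

def firestorm (ice_area : List (List Int)) (n : Int) (how_many_fs : Int) (divide_len : List Int) : List (List Int) :=
  divide_len.foldl (fun area dl => meltPy n (divideAndRotate n area dl)) ice_area

-- ===== PORT B =====
-- the forward block-rotation of one coordinate: (x, y) ↦ (x//L*L + y%L, y//L*L + L-1-x%L)
def fwdKey (L : Int) (p : Int × Int) : Int × Int :=
  (PySem.Int.floordiv p.1 L * L + PySem.Int.mod p.2 L,
   PySem.Int.floordiv p.2 L * L + L - 1 - PySem.Int.mod p.1 L)

-- a dict comprehension {k: v for (k, v) in pairs}
def dictOfPairs (l : List ((Int × Int) × Int)) : PySem.Dict (Int × Int) Int :=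
  l.foldl (fun d a => d.insert a.1 a.2) PySem.Dict.empty

-- {(x, y): ice_area[x][y] for x in range(size) for y in range(size) if ice_area[x][y]}
def buildCells (area : List (List Int)) (size : Int) : PySem.Dict (Int × Int) Int :=
  dictOfPairs ((((PySem.List.pyRange 0 size 1) ×ˢ (PySem.List.pyRange 0 size 1)).map
      (fun p => (p, gget area p.1 p.2))).filter (fun a => a.2 != 0))

-- sum(q in rot for q in ((x+1, y), (x-1, y), (x, y+1), (x, y-1)))
def meltCnt (rot : PySem.Dict (Int × Int) Int) (p : Int × Int) : Int :=
  (([(p.1 + 1, p.2), (p.1 - 1, p.2), (p.1, p.2 + 1), (p.1, p.2 - 1)] : List (Int × Int)).countP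
    (fun q => rot.contains q) : Int)

-- one round: rotate the keys forward, then melt by membership counts, dropping zeros
def roundD (cells : PySem.Dict (Int × Int) Int) (dl : Int) : PySem.Dict (Int × Int) Int :=
  let L := pow2 dl
  let rot := dictOfPairs (cells.items.map (fun a => (fwdKey L a.1, a.2)))
  dictOfPairs ((rot.items.map
      (fun a => (a.1, if meltCnt rot a.1 < 3 then a.2 - 1 else a.2))).filter (fun a => a.2 != 0))

def firestorm_alt (ice_area : List (List Int)) (n : Int) (how_many_fs : Int) (divide_len : List Int) : List (List Int) :=
  if divide_len = [] then ice_area else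
    let size := pow2 n
    let final := divide_len.foldl roundD (buildCells ice_area size)
    (PySem.List.pyRange 0 size 1).map (fun x =>
      (PySem.List.pyRange 0 size 1).map (fun y => final.getD (x, y) 0))

-- ===== PRECONDITION & SPEC =====
-- Pre_ = exactly the inputs on which the Python A returns: either no rounds at all, or
-- n ≥ 0 (a negative n makes 2**n a float → TypeError in range), 2^n ≤ len(ice_area)
-- (said as n < bit_length(len) so huge n need not evaluate 2^n), every dl in [0, n]
-- (negative dl → float step → TypeError; dl > n → IndexError), and each of the first
-- 2^n rows has at least 2^n entries (otherwise IndexError).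
def Pre_firestorm (ice_area : List (List Int)) (n : Int) (how_many_fs : Int) (divide_len : List Int) : Prop :=
  divide_len = [] ∨
    (0 ≤ n ∧ n < (PySem.Int.bitLength (ice_area.length : Int) : Int) ∧
     (∀ dl ∈ divide_len, 0 ≤ dl ∧ dl ≤ n) ∧
     (∀ row ∈ ice_area.take (2 ^ n.toNat), 2 ^ n.toNat ≤ row.length))
instance (ice_area : List (List Int)) (n : Int) (how_many_fs : Int) (divide_len : List Int) : Decidable (Pre_firestorm ice_area n how_many_fs divide_len) := by unfold Pre_firestorm; infer_instance

def pvWitness_firestorm : List (List Int) × Int × Int × List Int := ([[1, 2], [3, 4]], 1, 1, [0, 1])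

def Spec_firestorm (ice_area : List (List Int)) (n : Int) (how_many_fs : Int) (divide_len : List Int) (out : List (List Int)) : Prop := out = firestorm_alt ice_area n how_many_fs divide_len
instance (ice_area : List (List Int)) (n : Int) (how_many_fs : Int) (divide_len : List Int) (out : List (List Int)) : Decidable (Spec_firestorm ice_area n how_many_fs divide_len out) := by unfold Spec_firestorm; infer_instance

-- ===== CLAIM (what is proved, stated in full; the proofs are below) =====
def Claim_equal_firestorm : Prop := ∀ (ice_area : List (List Int)) (n : Int) (how_many_fs : Int) (divide_len : List Int), Dom_firestorm ice_area n how_many_fs divide_len → Pre_firestorm ice_area n how_many_fs divide_len → Spec_firestorm ice_area n how_many_fs divide_len (firestorm ice_area n how_many_fs divide_len)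

-- ===== LEMMAS AND PROOFS =====
def Sh (g : List (List Int)) (size : Int) : Prop :=
  g.length = size.toNat ∧ ∀ row ∈ g, row.length = size.toNat
def InR (size x y : Int) : Prop := 0 ≤ x ∧ x < size ∧ 0 ≤ y ∧ y < size

theorem pyGetD_mem_or_default {α : Type} (xs : List α) (i : Int) (d : α) :
    PySem.List.pyGetD xs i d = d ∨ PySem.List.pyGetD xs i d ∈ xs := by
  unfold PySem.List.pyGetD PySem.List.pyGet?
  cases h : PySem.List.pyIdx? xs.length i with
  | none => simp
  | some k =>
    cases h2 : xs[k]? with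
    | none => simp [h2]
    | some a => right; simp [h2]; exact List.mem_of_getElem? h2

theorem gget_zeroGrid (size p q : Int) : gget (zeroGrid size) p q = 0 := by
  unfold gget
  rcases pyGetD_mem_or_default (zeroGrid size) p [] with h | h
  · rw [h]
    rcases pyGetD_mem_or_default ([] : List Int) q 0 with h2 | h2
    · exact h2
    · simp at h2
  · unfold zeroGrid at h ⊢
    rcases List.mem_map.1 h with ⟨x, _, hx⟩
    rw [← hx, PySem.List.pyRepeat_singleton]
    rcases pyGetD_mem_or_default (List.replicate size.toNat (0:Int)) q 0 with h2 | h2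
    · exact h2
    · exact List.eq_of_mem_replicate h2

theorem pyRange_zero_eq_map {size : Int} (h : 0 ≤ size) :
    PySem.List.pyRange 0 size 1 = List.map (fun k : Nat => (k : Int)) (List.range size.toNat) := by
  have hs : size = ((size.toNat : Nat) : Int) := by omega
  conv_lhs => rw [hs]
  exact PySem.List.pyRange_zero_natCast size.toNat

theorem len_pyRange_zero {size : Int} (h : 0 ≤ size) : (PySem.List.pyRange 0 size 1).length = size.toNat := by
  rw [pyRange_zero_eq_map h]; simp

theorem Sh_zeroGrid {size : Int} (h : 0 ≤ size) : Sh (zeroGrid size) size := by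
  constructor
  · unfold zeroGrid; rw [List.length_map, len_pyRange_zero h]
  · intro row hrow
    rcases List.mem_map.1 hrow with ⟨x, _, hx⟩
    rw [← hx, PySem.List.pyRepeat_singleton, List.length_replicate]

theorem Sh_gset {g : List (List Int)} {size : Int} (hg : Sh g size) (i j v : Int) (hi : 0 ≤ i) :
    Sh (gset g i j v) size := by
  unfold gset
  rw [PySem.List.pySetD_of_nonneg _ _ hi]
  by_cases hlt : i.toNat < g.length
  · constructor
    · rw [List.length_set]; exact hg.1
    · intro row hrow
      rcases List.mem_or_eq_of_mem_set hrow with h | h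
      · exact hg.2 row h
      · subst h
        rw [PySem.List.length_pySetD, PySem.List.pyGetD_of_nonneg _ _ hi,
            List.getD_eq_getElem _ _ hlt]
        exact hg.2 _ (List.getElem_mem hlt)
  · rw [List.set_eq_of_length_le (by omega : g.length ≤ i.toNat)]
    exact hg

theorem gget_gset {g : List (List Int)} {size : Int} (hg : Sh g size) {i j : Int}
    (hij : InR size i j) (v : Int) {p q : Int} (hp : 0 ≤ p) (hq : 0 ≤ q) :
    gget (gset g i j v) p q = if p = i ∧ q = j then v else gget g p q := by
  obtain ⟨hi0, hi1, hj0, hj1⟩ := hij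
  have hlen : i.toNat < g.length := by rw [hg.1]; omega
  have hi' : i = ((i.toNat : Nat) : Int) := by omega
  have hj' : j = ((j.toNat : Nat) : Int) := by omega
  have hp' : p = ((p.toNat : Nat) : Int) := by omega
  have hq' : q = ((q.toNat : Nat) : Int) := by omega
  have hrow : PySem.List.pyGetD g i [] = g[i.toNat] := by
    rw [PySem.List.pyGetD_of_nonneg _ _ hi0, List.getD_eq_getElem _ _ hlen]
  have hjlen : j.toNat < (PySem.List.pyGetD g i []).length := by
    rw [hrow, hg.2 _ (List.getElem_mem hlen)]; omega
  unfold gget gset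
  rw [hi'] at hjlen
  rw [hi', hj', hp', hq']
  rw [PySem.List.pyGetD_pySetD_natCast _ _ _ _ _ hlen]
  by_cases hpi : p.toNat = i.toNat
  · rw [if_pos hpi, PySem.List.pyGetD_pySetD_natCast _ _ _ _ _ hjlen]
    by_cases hqj : q.toNat = j.toNat
    · rw [if_pos hqj, if_pos ⟨by omega, by omega⟩]
    · rw [if_neg hqj, if_neg (by omega), hpi]
  · rw [if_neg hpi, if_neg (by omega)]

theorem nodup_pyRange_zero (size : Int) : (PySem.List.pyRange 0 size 1).Nodup := by
  rcases le_or_gt 0 size with h | h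
  · rw [pyRange_zero_eq_map h]
    exact (List.nodup_range).map (fun a b hab => by exact_mod_cast hab)
  · rw [PySem.List.pyRange_of_pos 0 size (by norm_num), if_neg (by omega : ¬ (0:Int) < size)]
    simp

theorem gget_eq_getElem {g : List (List Int)} {size : Int} (hg : Sh g size) {a b : Nat}
    (ha : a < size.toNat) :
    gget g (a : Int) (b : Int) = (g[a]'(by rw [hg.1]; omega)).getD b 0 := by
  unfold gget
  rw [PySem.List.pyGetD_of_nonneg _ _ (by positivity), PySem.List.pyGetD_of_nonneg _ _ (by positivity)]
  simp only [Int.toNat_natCast]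
  rw [List.getD_eq_getElem _ _ (by rw [hg.1]; omega : a < g.length)]

theorem grid_ext {g1 g2 : List (List Int)} {size : Int} (h1 : Sh g1 size) (h2 : Sh g2 size)
    (h : ∀ p q : Int, InR size p q → gget g1 p q = gget g2 p q) : g1 = g2 := by
  apply List.ext_getElem (by rw [h1.1, h2.1])
  intro a ha1 ha2
  have ha : a < size.toNat := h1.1 ▸ ha1
  have hr1 : g1[a].length = size.toNat := h1.2 _ (List.getElem_mem ha1)
  have hr2 : g2[a].length = size.toNat := h2.2 _ (List.getElem_mem ha2)
  apply List.ext_getElem (by rw [hr1, hr2])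
  intro b hb1 hb2
  have hb : b < size.toNat := by omega
  have hs : 0 < size := by omega
  have := h (a : Int) (b : Int) ⟨by positivity, by omega, by positivity, by omega⟩
  rw [gget_eq_getElem h1 ha, gget_eq_getElem h2 ha] at this
  rwa [List.getD_eq_getElem _ _ (by omega), List.getD_eq_getElem _ _ (by omega)] at this

theorem getElem_pyRange_zero {size : Int} {k : Nat} (h : k < (PySem.List.pyRange 0 size 1).length) :
    (PySem.List.pyRange 0 size 1)[k] = (k : Int) := by
  rcases le_or_gt 0 size with h0 | h0
  · rw [List.getElem_of_eq (pyRange_zero_eq_map h0), List.getElem_map, List.getElem_range]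
  · exfalso
    rw [PySem.List.pyRange_of_pos 0 size (by norm_num), if_neg (by omega : ¬ (0:Int) < size)] at h
    simp at h

theorem Sh_map_map {size : Int} (h : 0 ≤ size) (f : Int → Int → Int) :
    Sh ((PySem.List.pyRange 0 size 1).map (fun x => (PySem.List.pyRange 0 size 1).map (fun y => f x y))) size := by
  constructor
  · rw [List.length_map, len_pyRange_zero h]
  · intro row hrow
    rcases List.mem_map.1 hrow with ⟨x, _, hx⟩
    rw [← hx, List.length_map, len_pyRange_zero h]

theorem gget_map_map {size : Int} (f : Int → Int → Int) {p q : Int} (h : InR size p q) :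
    gget ((PySem.List.pyRange 0 size 1).map (fun x => (PySem.List.pyRange 0 size 1).map (fun y => f x y))) p q
      = f p q := by
  obtain ⟨hp0, hp1, hq0, hq1⟩ := h
  have hsz : 0 ≤ size := by omega
  have hp' : p = ((p.toNat : Nat) : Int) := by omega
  have hq' : q = ((q.toNat : Nat) : Int) := by omega
  have hplen : p.toNat < (PySem.List.pyRange 0 size 1).length := by rw [len_pyRange_zero hsz]; omega
  have hsh := Sh_map_map hsz f
  conv_lhs => rw [hp', hq', gget_eq_getElem hsh (by omega)]
  rw [List.getElem_map, List.getD_eq_getElem _ _ (by rw [List.length_map, len_pyRange_zero hsz]; omega),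
      List.getElem_map, getElem_pyRange_zero hplen, getElem_pyRange_zero (by rw [len_pyRange_zero hsz]; omega)]
  rw [← hp', ← hq']

theorem writes_const {size : Int} (F : Int → Int → Int) :
    ∀ (cells : List (Int × Int)) (t : List (List Int)), Sh t size →
    (∀ c ∈ cells, InR size c.1 c.2) →
    Sh (cells.foldl (fun t c => gset t c.1 c.2 (F c.1 c.2)) t) size ∧
    ∀ p q : Int, 0 ≤ p → 0 ≤ q →
      gget (cells.foldl (fun t c => gset t c.1 c.2 (F c.1 c.2)) t) p q
        = if (p, q) ∈ cells then F p q else gget t p q := by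
  intro cells
  induction cells with
  | nil => intro t ht _; exact ⟨ht, by simp⟩
  | cons c cs ih =>
    intro t ht hc
    have hcr := hc c (by simp)
    have ht1 : Sh (gset t c.1 c.2 (F c.1 c.2)) size := Sh_gset ht _ _ _ hcr.1
    obtain ⟨ihSh, ihE⟩ := ih (gset t c.1 c.2 (F c.1 c.2)) ht1 (fun x hx => hc x (List.mem_cons_of_mem _ hx))
    refine ⟨ihSh, ?_⟩
    intro p q hp hq
    rw [List.foldl_cons, ihE p q hp hq, gget_gset ht hcr _ hp hq]
    by_cases hcs : (p, q) ∈ cs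
    · rw [if_pos hcs, if_pos (List.mem_cons_of_mem _ hcs)]
    · rw [if_neg hcs]
      by_cases hcc : p = c.1 ∧ q = c.2
      · rw [if_pos hcc, if_pos (List.mem_cons.2 (Or.inl (by rw [hcc.1, hcc.2]))), hcc.1, hcc.2]
      · rw [if_neg hcc, if_neg (by
          intro hmem
          rcases List.mem_cons.1 hmem with h | h
          · exact hcc ⟨congrArg Prod.fst h, congrArg Prod.snd h⟩
          · exact hcs h)]

theorem inner_pass {size : Int} (step : List (List Int) → Int × Int → List (List Int))
    (ff : Int → Int → Int → Int)
    (hstep : ∀ t c, Sh t size → InR size c.1 c.2 → Sh (step t c) size ∧ ∀ p q : Int, 0 ≤ p → 0 ≤ q →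
      gget (step t c) p q = if p = c.1 ∧ q = c.2 then ff c.1 c.2 (gget t c.1 c.2) else gget t p q) :
    ∀ (ys : List Int) (t : List (List Int)) (x : Int), Sh t size → 0 ≤ x → x < size →
      (∀ y ∈ ys, 0 ≤ y ∧ y < size) → ys.Nodup →
      Sh (ys.foldl (fun t y => step t (x, y)) t) size ∧
      ∀ p q : Int, 0 ≤ p → 0 ≤ q →
        gget (ys.foldl (fun t y => step t (x, y)) t) p q
          = if p = x ∧ q ∈ ys then ff p q (gget t p q) else gget t p q := by
  intro ys
  induction ys with
  | nil => intro t x ht _ _ _ _; refine ⟨ht, ?_⟩; intro p q _ _; simp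
  | cons y ys ih =>
    intro t x ht hx0 hx1 hb hnd
    have hyb := hb y (by simp)
    have hin : InR size x y := ⟨hx0, hx1, hyb.1, hyb.2⟩
    obtain ⟨ht1, he1⟩ := hstep t (x, y) ht hin
    obtain ⟨ihSh, ihE⟩ := ih (step t (x, y)) x ht1 hx0 hx1
      (fun z hz => hb z (List.mem_cons_of_mem _ hz)) (List.Nodup.of_cons hnd)
    refine ⟨ihSh, ?_⟩
    intro p q hp hq
    have hyny : y ∉ ys := (List.nodup_cons.1 hnd).1
    rw [List.foldl_cons, ihE p q hp hq]
    by_cases h1 : p = x ∧ q ∈ ys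
    · have hqy : ¬ (p = x ∧ q = y) := fun hc => hyny (hc.2 ▸ h1.2)
      rw [if_pos h1, he1 p q hp hq, if_neg hqy, if_pos ⟨h1.1, List.mem_cons_of_mem _ h1.2⟩]
    · rw [if_neg h1, he1 p q hp hq]
      by_cases h2 : p = x ∧ q = y
      · rw [if_pos h2, if_pos ⟨h2.1, by rw [h2.2]; simp⟩, h2.1, h2.2]
      · rw [if_neg h2, if_neg (by
          rintro ⟨hpx, hmem⟩
          rcases List.mem_cons.1 hmem with h | h
          · exact h2 ⟨hpx, h⟩
          · exact h1 ⟨hpx, h⟩)]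

theorem outer_pass {size : Int} (step : List (List Int) → Int × Int → List (List Int))
    (ff : Int → Int → Int → Int)
    (hstep : ∀ t c, Sh t size → InR size c.1 c.2 → Sh (step t c) size ∧ ∀ p q : Int, 0 ≤ p → 0 ≤ q →
      gget (step t c) p q = if p = c.1 ∧ q = c.2 then ff c.1 c.2 (gget t c.1 c.2) else gget t p q) :
    ∀ (xs : List Int) (t : List (List Int)), Sh t size →
      (∀ x ∈ xs, 0 ≤ x ∧ x < size) → xs.Nodup →
      Sh (xs.foldl (fun t x => (PySem.List.pyRange 0 size 1).foldl (fun t y => step t (x, y)) t) t) size ∧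
      ∀ p q : Int, 0 ≤ p → 0 ≤ q →
        gget (xs.foldl (fun t x => (PySem.List.pyRange 0 size 1).foldl (fun t y => step t (x, y)) t) t) p q
          = if p ∈ xs ∧ q < size then ff p q (gget t p q) else gget t p q := by
  intro xs
  induction xs with
  | nil => intro t ht _ _; refine ⟨ht, ?_⟩; intro p q _ _; simp
  | cons x xs ih =>
    intro t ht hb hnd
    have hxb := hb x (by simp)
    obtain ⟨ht1, he1⟩ := inner_pass step ff hstep (PySem.List.pyRange 0 size 1) t x ht hxb.1 hxb.2
      (fun y hy => by
        have := PySem.List.mem_pyRange_one.1 hy; exact ⟨this.1, this.2⟩)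
      (nodup_pyRange_zero size)
    obtain ⟨ihSh, ihE⟩ := ih _ ht1 (fun z hz => hb z (List.mem_cons_of_mem _ hz)) (List.Nodup.of_cons hnd)
    refine ⟨ihSh, ?_⟩
    intro p q hp hq
    have hxnx : x ∉ xs := (List.nodup_cons.1 hnd).1
    rw [List.foldl_cons, ihE p q hp hq]
    by_cases h1 : p ∈ xs ∧ q < size
    · have hpx : p ≠ x := fun hc => hxnx (hc ▸ h1.1)
      rw [if_pos h1, he1 p q hp hq, if_neg (fun hc => hpx hc.1),
          if_pos ⟨List.mem_cons_of_mem _ h1.1, h1.2⟩]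
    · rw [if_neg h1, he1 p q hp hq]
      by_cases h2 : p = x ∧ q ∈ PySem.List.pyRange 0 size 1
      · have hq1 : q < size := (PySem.List.mem_pyRange_one.1 h2.2).2
        rw [if_pos h2, if_pos ⟨by rw [h2.1]; simp, hq1⟩, h2.1]
      · rw [if_neg h2, if_neg (by
          rintro ⟨hmem, hqs⟩
          rcases List.mem_cons.1 hmem with h | h
          · exact h2 ⟨h, PySem.List.mem_pyRange_one.2 ⟨hq, hqs⟩⟩
          · exact h1 ⟨h, hqs⟩)]

theorem grid_pass {size : Int} (step : List (List Int) → Int × Int → List (List Int))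
    (ff : Int → Int → Int → Int)
    (hstep : ∀ t c, Sh t size → InR size c.1 c.2 → Sh (step t c) size ∧ ∀ p q : Int, 0 ≤ p → 0 ≤ q →
      gget (step t c) p q = if p = c.1 ∧ q = c.2 then ff c.1 c.2 (gget t c.1 c.2) else gget t p q)
    (t : List (List Int)) (ht : Sh t size) :
    Sh ((PySem.List.pyRange 0 size 1).foldl (fun t x =>
        (PySem.List.pyRange 0 size 1).foldl (fun t y => step t (x, y)) t) t) size ∧
    ∀ p q : Int, 0 ≤ p → 0 ≤ q →
      gget ((PySem.List.pyRange 0 size 1).foldl (fun t x =>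
        (PySem.List.pyRange 0 size 1).foldl (fun t y => step t (x, y)) t) t) p q
        = if p < size ∧ q < size then ff p q (gget t p q) else gget t p q := by
  obtain ⟨hSh, hE⟩ := outer_pass step ff hstep (PySem.List.pyRange 0 size 1) t ht
    (fun x hx => by
      have := PySem.List.mem_pyRange_one.1 hx; exact ⟨this.1, this.2⟩)
    (nodup_pyRange_zero size)
  refine ⟨hSh, ?_⟩
  intro p q hp hq
  rw [hE p q hp hq]
  by_cases h : p < size ∧ q < size
  · rw [if_pos ⟨PySem.List.mem_pyRange_one.2 ⟨hp, h.1⟩, h.2⟩, if_pos h]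
  · rw [if_neg (by
      rintro ⟨hmem, hqs⟩
      exact h ⟨(PySem.List.mem_pyRange_one.1 hmem).2, hqs⟩), if_neg h]

-- index-mapping arithmetic: on a block base i (L ∣ i) plus offset c ∈ [0, L)
theorem md_fd {L i c : Int} (hL : 0 < L) (hdvd : L ∣ i) (h0 : 0 ≤ c) (h1 : c < L) :
    PySem.Int.floordiv (i + c) L * L = i ∧ PySem.Int.mod (i + c) L = c := by
  have hmul : i / L * L = i := Int.ediv_mul_cancel hdvd
  have hq : PySem.Int.floordiv (i + c) L = i / L :=
    (PySem.Int.floordiv_eq_iff_of_pos hL).2 ⟨by omega, by rw [add_mul, one_mul]; omega⟩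
  have := PySem.Int.floordiv_mul_add_mod (i + c) L
  rw [hq] at this ⊢
  omega

-- the inverse coordinate map (what A's copy uses to READ): (x, y) ↦ (x//L*L + L-1-y%L, y//L*L + x%L)
def bwdKey (L : Int) (p : Int × Int) : Int × Int :=
  (PySem.Int.floordiv p.1 L * L + L - 1 - PySem.Int.mod p.2 L,
   PySem.Int.floordiv p.2 L * L + PySem.Int.mod p.1 L)

-- the rotated grid as a pure per-cell formula, and the melted grid likewise
def rotAlt (area : List (List Int)) (size L : Int) : List (List Int) :=
  (PySem.List.pyRange 0 size 1).map (fun x => (PySem.List.pyRange 0 size 1).map (fun y =>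
    gget area (bwdKey L (x, y)).1 (bwdKey L (x, y)).2))

def cntAlt (g : List (List Int)) (size x y : Int) : Int :=
  (([(x + 1, y), (x - 1, y), (x, y + 1), (x, y - 1)] : List (Int × Int)).countP
    (fun p => decide (0 ≤ p.1 ∧ p.1 < size ∧ 0 ≤ p.2 ∧ p.2 < size ∧ gget g p.1 p.2 ≠ 0)) : Int)

def meltAlt (g : List (List Int)) (size : Int) : List (List Int) :=
  (PySem.List.pyRange 0 size 1).map (fun x => (PySem.List.pyRange 0 size 1).map (fun y =>
    if gget g x y ≠ 0 ∧ cntAlt g size x y < 3 then gget g x y - 1 else gget g x y))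

def roundG (n : Int) (area : List (List Int)) (dl : Int) : List (List Int) :=
  meltAlt (rotAlt area (pow2 n) (pow2 dl)) (pow2 n)

-- the cell list A's quadruple loop writes, in write order
def rotCells (size L : Int) : List (Int × Int) :=
  (PySem.List.pyRange 0 size L).flatMap (fun i =>
    (PySem.List.pyRange 0 size L).flatMap (fun j =>
      (PySem.List.pyRange 0 L 1).flatMap (fun r =>
        (PySem.List.pyRange 0 L 1).map (fun c => (i + c, j + L - 1 - r)))))

theorem rot_flat {n dl : Int} (hL : 0 < pow2 dl) (area : List (List Int)) :
    divideAndRotate n area dl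
      = (rotCells (pow2 n) (pow2 dl)).foldl
          (fun t c => gset t c.1 c.2 (gget area (bwdKey (pow2 dl) c).1 (bwdKey (pow2 dl) c).2))
          (zeroGrid (pow2 n)) := by
  unfold divideAndRotate rotCells
  rw [List.foldl_flatMap]
  apply PySem.List.foldl_congr_mem
  intro g i hi
  rw [List.foldl_flatMap]
  apply PySem.List.foldl_congr_mem
  intro g j hj
  rw [List.foldl_flatMap]
  apply PySem.List.foldl_congr_mem
  intro g r hr
  rw [List.foldl_map]
  apply PySem.List.foldl_congr_mem
  intro g c hc
  obtain ⟨hi0, hi1, hid⟩ := (PySem.List.mem_pyRange_iff_of_pos hL i).1 hi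
  obtain ⟨hj0, hj1, hjd⟩ := (PySem.List.mem_pyRange_iff_of_pos hL j).1 hj
  obtain ⟨hr0, hr1⟩ := PySem.List.mem_pyRange_one.1 hr
  obtain ⟨hc0, hc1⟩ := PySem.List.mem_pyRange_one.1 hc
  have hid' : pow2 dl ∣ i := by simpa using hid
  have hjd' : pow2 dl ∣ j := by simpa using hjd
  obtain ⟨hf1, hm1⟩ := md_fd hL hid' hc0 hc1
  have hre : j + pow2 dl - 1 - r = j + (pow2 dl - 1 - r) := by ring
  obtain ⟨hf2, hm2⟩ :=
    md_fd hL hjd' (by omega : (0:Int) ≤ pow2 dl - 1 - r) (by omega : pow2 dl - 1 - r < pow2 dl)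
  rw [hre]
  congr 1
  unfold bwdKey
  have e1 : PySem.Int.floordiv (i + c) (pow2 dl) * pow2 dl + pow2 dl - 1
      - PySem.Int.mod (j + (pow2 dl - 1 - r)) (pow2 dl) = i + r := by
    rw [hf1, hm2]; omega
  have e2 : PySem.Int.floordiv (j + (pow2 dl - 1 - r)) (pow2 dl) * pow2 dl
      + PySem.Int.mod (i + c) (pow2 dl) = j + c := by
    rw [hf2, hm1]
  simp only [e1, e2]

theorem rotCells_inR {size L : Int} (hL : 0 < L) (hdvd : L ∣ size) :
    ∀ c ∈ rotCells size L, InR size c.1 c.2 := by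
  intro c hc
  unfold rotCells at hc
  obtain ⟨i, hi, hc⟩ := List.mem_flatMap.1 hc
  obtain ⟨j, hj, hc⟩ := List.mem_flatMap.1 hc
  obtain ⟨r, hr, hc⟩ := List.mem_flatMap.1 hc
  obtain ⟨cc, hcc, hc⟩ := List.mem_map.1 hc
  obtain ⟨hi0, hi1, hid⟩ := (PySem.List.mem_pyRange_iff_of_pos hL i).1 hi
  obtain ⟨hj0, hj1, hjd⟩ := (PySem.List.mem_pyRange_iff_of_pos hL j).1 hj
  obtain ⟨hr0, hr1⟩ := PySem.List.mem_pyRange_one.1 hr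
  obtain ⟨hc0, hc1⟩ := PySem.List.mem_pyRange_one.1 hcc
  have hiL : i + L ≤ size := by
    have : L ∣ size - i := dvd_sub hdvd (by simpa using hid)
    have := Int.le_of_dvd (by omega) this
    omega
  have hjL : j + L ≤ size := by
    have : L ∣ size - j := dvd_sub hdvd (by simpa using hjd)
    have := Int.le_of_dvd (by omega) this
    omega
  rw [← hc]
  exact ⟨by omega, by omega, by omega, by omega⟩

theorem rotCells_cover {size L : Int} (hL : 0 < L) {p q : Int} (h : InR size p q) :
    (p, q) ∈ rotCells size L := by
  obtain ⟨hp0, hp1, hq0, hq1⟩ := h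
  have hfp : PySem.Int.floordiv p L * L + PySem.Int.mod p L = p := PySem.Int.floordiv_mul_add_mod p L
  have hfq : PySem.Int.floordiv q L * L + PySem.Int.mod q L = q := PySem.Int.floordiv_mul_add_mod q L
  have hmp0 := PySem.Int.mod_nonneg p hL
  have hmp1 := PySem.Int.mod_lt p hL
  have hmq0 := PySem.Int.mod_nonneg q hL
  have hmq1 := PySem.Int.mod_lt q hL
  have hdp : 0 ≤ PySem.Int.floordiv p L := by
    rw [PySem.Int.floordiv_eq_ediv_of_pos hL]; exact Int.ediv_nonneg hp0 (by omega)
  have hdq : 0 ≤ PySem.Int.floordiv q L := by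
    rw [PySem.Int.floordiv_eq_ediv_of_pos hL]; exact Int.ediv_nonneg hq0 (by omega)
  unfold rotCells
  refine List.mem_flatMap.2 ⟨PySem.Int.floordiv p L * L, ?_, ?_⟩
  · exact (PySem.List.mem_pyRange_iff_of_pos hL _).2 ⟨by positivity, by omega, by simpa using Dvd.intro _ (mul_comm L (PySem.Int.floordiv p L) ▸ rfl)⟩
  refine List.mem_flatMap.2 ⟨PySem.Int.floordiv q L * L, ?_, ?_⟩
  · exact (PySem.List.mem_pyRange_iff_of_pos hL _).2 ⟨by positivity, by omega, by simpa using Dvd.intro _ (mul_comm L (PySem.Int.floordiv q L) ▸ rfl)⟩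
  refine List.mem_flatMap.2 ⟨L - 1 - PySem.Int.mod q L, PySem.List.mem_pyRange_one.2 ⟨by omega, by omega⟩, ?_⟩
  refine List.mem_map.2 ⟨PySem.Int.mod p L, PySem.List.mem_pyRange_one.2 ⟨by omega, by omega⟩, ?_⟩
  exact Prod.ext (by omega) (by omega)

theorem rot_eq {n dl : Int} (hn : 0 ≤ n) (hdl : 0 ≤ dl) (hle : dl ≤ n) (area : List (List Int)) :
    divideAndRotate n area dl = rotAlt area (pow2 n) (pow2 dl) := by
  have hL : 0 < pow2 dl := by unfold pow2; positivity
  have hS : 0 < pow2 n := by unfold pow2; positivity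
  have hdvd : pow2 dl ∣ pow2 n := pow_dvd_pow 2 (by omega : dl.toNat ≤ n.toNat)
  rw [rot_flat hL]
  obtain ⟨hsh, hent⟩ := writes_const
    (fun p q => gget area (bwdKey (pow2 dl) (p, q)).1 (bwdKey (pow2 dl) (p, q)).2)
    (rotCells (pow2 n) (pow2 dl)) (zeroGrid (pow2 n)) (Sh_zeroGrid hS.le) (rotCells_inR hL hdvd)
  have hflat : ((rotCells (pow2 n) (pow2 dl)).foldl
      (fun t c => gset t c.1 c.2 (gget area (bwdKey (pow2 dl) c).1 (bwdKey (pow2 dl) c).2))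
      (zeroGrid (pow2 n)))
      = ((rotCells (pow2 n) (pow2 dl)).foldl
      (fun t c => gset t c.1 c.2 (gget area (bwdKey (pow2 dl) (c.1, c.2)).1 (bwdKey (pow2 dl) (c.1, c.2)).2))
      (zeroGrid (pow2 n))) := by
    apply PySem.List.foldl_congr_mem; intro g c _; rfl
  rw [hflat]
  apply grid_ext hsh (Sh_map_map hS.le _)
  intro p q hin
  rw [hent p q hin.1 hin.2.2.1, if_pos (rotCells_cover hL hin)]
  exact (gget_map_map (f := fun x y => gget area (bwdKey (pow2 dl) (x, y)).1 (bwdKey (pow2 dl) (x, y)).2) hin).symm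

theorem mini {size x y : Int} (hxy : InR size x y) (cond : Prop) [Decidable cond] {k : Int}
    {t t0 : List (List Int)} (hsh : Sh t size)
    (hent : ∀ p q : Int, 0 ≤ p → 0 ≤ q →
      gget t p q = if p = x ∧ q = y then gget t0 x y + k else gget t0 p q) :
    Sh (if cond then gset t x y (gget t x y + 1) else t) size ∧
    ∀ p q : Int, 0 ≤ p → 0 ≤ q →
      gget (if cond then gset t x y (gget t x y + 1) else t) p q
        = if p = x ∧ q = y then gget t0 x y + (k + if cond then 1 else 0) else gget t0 p q := by
  by_cases hc : cond
  · rw [if_pos hc]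
    refine ⟨Sh_gset hsh _ _ _ hxy.1, ?_⟩
    intro p q hp hq
    rw [gget_gset hsh hxy _ hp hq]
    by_cases hpq : p = x ∧ q = y
    · rw [if_pos hpq, if_pos hpq, hent x y hxy.1 hxy.2.2.1, if_pos ⟨rfl, rfl⟩, if_pos hc]
      ring
    · rw [if_neg hpq, if_neg hpq, hent p q hp hq, if_neg hpq]
  · rw [if_neg hc]
    refine ⟨hsh, ?_⟩
    intro p q hp hq
    rw [hent p q hp hq, if_neg hc, add_zero]

theorem cnt_expand (g : List (List Int)) (size x y : Int) :
    cntAlt g size x y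
      = (if 0 ≤ x + 1 ∧ x + 1 < size ∧ 0 ≤ y ∧ y < size ∧ gget g (x + 1) y ≠ 0 then (1:Int) else 0)
      + (if 0 ≤ x - 1 ∧ x - 1 < size ∧ 0 ≤ y ∧ y < size ∧ gget g (x - 1) y ≠ 0 then 1 else 0)
      + (if 0 ≤ x ∧ x < size ∧ 0 ≤ y + 1 ∧ y + 1 < size ∧ gget g x (y + 1) ≠ 0 then 1 else 0)
      + (if 0 ≤ x ∧ x < size ∧ 0 ≤ y - 1 ∧ y - 1 < size ∧ gget g x (y - 1) ≠ 0 then 1 else 0) := by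
  unfold cntAlt
  simp only [List.countP_cons, List.countP_nil, decide_eq_true_eq]
  push_cast
  split_ifs <;> norm_num

theorem dirs_collapse {size : Int} (rot : List (List Int)) {x y : Int} (hxy : InR size x y)
    (t : List (List Int)) (hsh : Sh t size) :
    Sh (([(1, 0), (-1, 0), (0, 1), (0, -1)] : List (Int × Int)).foldl (fun t d =>
        if 0 ≤ x + d.1 ∧ x + d.1 < size ∧ 0 ≤ y + d.2 ∧ y + d.2 < size ∧ gget rot (x + d.1) (y + d.2) ≠ 0
        then gset t x y (gget t x y + 1) else t) t) size ∧
    ∀ p q : Int, 0 ≤ p → 0 ≤ q →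
      gget (([(1, 0), (-1, 0), (0, 1), (0, -1)] : List (Int × Int)).foldl (fun t d =>
        if 0 ≤ x + d.1 ∧ x + d.1 < size ∧ 0 ≤ y + d.2 ∧ y + d.2 < size ∧ gget rot (x + d.1) (y + d.2) ≠ 0
        then gset t x y (gget t x y + 1) else t) t) p q
        = if p = x ∧ q = y then gget t x y + cntAlt rot size x y else gget t p q := by
  have base : ∀ p q : Int, 0 ≤ p → 0 ≤ q →
      gget t p q = if p = x ∧ q = y then gget t x y + 0 else gget t p q := by
    intro p q _ _
    split_ifs with h
    · rw [h.1, h.2]; ring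
    · rfl
  have m1 := mini hxy
    (0 ≤ x + 1 ∧ x + 1 < size ∧ 0 ≤ y + 0 ∧ y + 0 < size ∧ gget rot (x + 1) (y + 0) ≠ 0)
    hsh base
  have m2 := mini hxy
    (0 ≤ x + -1 ∧ x + -1 < size ∧ 0 ≤ y + 0 ∧ y + 0 < size ∧ gget rot (x + -1) (y + 0) ≠ 0)
    m1.1 m1.2
  have m3 := mini hxy
    (0 ≤ x + 0 ∧ x + 0 < size ∧ 0 ≤ y + 1 ∧ y + 1 < size ∧ gget rot (x + 0) (y + 1) ≠ 0)
    m2.1 m2.2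
  have m4 := mini hxy
    (0 ≤ x + 0 ∧ x + 0 < size ∧ 0 ≤ y + -1 ∧ y + -1 < size ∧ gget rot (x + 0) (y + -1) ≠ 0)
    m3.1 m3.2
  simp only [List.foldl_cons, List.foldl_nil]
  refine ⟨m4.1, ?_⟩
  intro p q hp hq
  rw [m4.2 p q hp hq]
  by_cases h : p = x ∧ q = y
  · rw [if_pos h, if_pos h, cnt_expand]
    simp only [add_zero, zero_add]
    norm_num [sub_eq_add_neg]
  · rw [if_neg h, if_neg h]

def pass1 (rot : List (List Int)) (size : Int) : List (List Int) :=
  (PySem.List.pyRange 0 size 1).foldl (fun t x =>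
    (PySem.List.pyRange 0 size 1).foldl (fun t y =>
      ([(1, 0), (-1, 0), (0, 1), (0, -1)] : List (Int × Int)).foldl (fun t d =>
        if 0 ≤ x + d.1 ∧ x + d.1 < size ∧ 0 ≤ y + d.2 ∧ y + d.2 < size ∧ gget rot (x + d.1) (y + d.2) ≠ 0
        then gset t x y (gget t x y + 1) else t) t) t) (zeroGrid size)

theorem pass1_ent (rot : List (List Int)) {size : Int} (hs0 : 0 ≤ size) :
    Sh (pass1 rot size) size ∧
    ∀ p q : Int, 0 ≤ p → 0 ≤ q →
      gget (pass1 rot size) p q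
        = if p < size ∧ q < size then gget (zeroGrid size) p q + cntAlt rot size p q
          else gget (zeroGrid size) p q :=
  grid_pass
    (fun t c => ([(1, 0), (-1, 0), (0, 1), (0, -1)] : List (Int × Int)).foldl (fun t d =>
        if 0 ≤ c.1 + d.1 ∧ c.1 + d.1 < size ∧ 0 ≤ c.2 + d.2 ∧ c.2 + d.2 < size ∧ gget rot (c.1 + d.1) (c.2 + d.2) ≠ 0
        then gset t c.1 c.2 (gget t c.1 c.2 + 1) else t) t)
    (fun a b old => old + cntAlt rot size a b)
    (fun t c hsh hc => dirs_collapse rot hc t hsh)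
    (zeroGrid size) (Sh_zeroGrid hs0)

def pass2 (rot : List (List Int)) (size : Int) : List (List Int) :=
  (PySem.List.pyRange 0 size 1).foldl (fun g x =>
    (PySem.List.pyRange 0 size 1).foldl (fun g y =>
      if gget (pass1 rot size) x y < 3 ∧ gget g x y ≠ 0 then gset g x y (gget g x y - 1) else g) g) rot

theorem step2_spec {size : Int} (cg : Int → Int → Int) (t : List (List Int)) (c : Int × Int)
    (hsh : Sh t size) (hc : InR size c.1 c.2) :
    Sh (if cg c.1 c.2 < 3 ∧ gget t c.1 c.2 ≠ 0 then gset t c.1 c.2 (gget t c.1 c.2 - 1) else t) size ∧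
    ∀ p q : Int, 0 ≤ p → 0 ≤ q →
      gget (if cg c.1 c.2 < 3 ∧ gget t c.1 c.2 ≠ 0 then gset t c.1 c.2 (gget t c.1 c.2 - 1) else t) p q
        = if p = c.1 ∧ q = c.2
          then (if cg c.1 c.2 < 3 ∧ gget t c.1 c.2 ≠ 0 then gget t c.1 c.2 - 1 else gget t c.1 c.2)
          else gget t p q := by
  by_cases hcond : cg c.1 c.2 < 3 ∧ gget t c.1 c.2 ≠ 0
  · rw [if_pos hcond, if_pos hcond]
    refine ⟨Sh_gset hsh _ _ _ hc.1, ?_⟩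
    intro p q hp hq
    rw [gget_gset hsh hc _ hp hq]
  · rw [if_neg hcond, if_neg hcond]
    refine ⟨hsh, ?_⟩
    intro p q hp hq
    by_cases hpq : p = c.1 ∧ q = c.2
    · rw [if_pos hpq, hpq.1, hpq.2]
    · rw [if_neg hpq]

theorem pass2_ent (rot : List (List Int)) {size : Int} (hr : Sh rot size) :
    Sh (pass2 rot size) size ∧
    ∀ p q : Int, 0 ≤ p → 0 ≤ q →
      gget (pass2 rot size) p q
        = if p < size ∧ q < size
          then (if gget (pass1 rot size) p q < 3 ∧ gget rot p q ≠ 0 then gget rot p q - 1 else gget rot p q)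
          else gget rot p q :=
  grid_pass
    (fun t c => if gget (pass1 rot size) c.1 c.2 < 3 ∧ gget t c.1 c.2 ≠ 0
                then gset t c.1 c.2 (gget t c.1 c.2 - 1) else t)
    (fun a b old => if gget (pass1 rot size) a b < 3 ∧ old ≠ 0 then old - 1 else old)
    (fun t c hsh hc => step2_spec (fun a b => gget (pass1 rot size) a b) t c hsh hc)
    rot hr

theorem melt_eq {n : Int} {rot : List (List Int)} (hr : Sh rot (pow2 n)) :
    meltPy n rot = meltAlt rot (pow2 n) := by
  have hs0 : (0:Int) ≤ pow2 n := by unfold pow2; positivity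
  have e0 : meltPy n rot = pass2 rot (pow2 n) := rfl
  rw [e0]
  unfold meltAlt
  obtain ⟨h2sh, h2e⟩ := pass2_ent rot hr
  obtain ⟨h1sh, h1e⟩ := pass1_ent rot hs0
  apply grid_ext h2sh (Sh_map_map hs0 _)
  intro p q hin
  have hcnt : gget (pass1 rot (pow2 n)) p q = cntAlt rot (pow2 n) p q := by
    rw [h1e p q hin.1 hin.2.2.1, if_pos (show p < pow2 n ∧ q < pow2 n from ⟨hin.2.1, hin.2.2.2⟩),
        gget_zeroGrid, zero_add]
  rw [h2e p q hin.1 hin.2.2.1, if_pos (show p < pow2 n ∧ q < pow2 n from ⟨hin.2.1, hin.2.2.2⟩),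
      gget_map_map (f := fun x y => if gget rot x y ≠ 0 ∧ cntAlt rot (pow2 n) x y < 3
        then gget rot x y - 1 else gget rot x y) hin,
      hcnt]
  exact if_congr (and_comm) rfl rfl

-- A as the pure grid recurrence
theorem firestorm_eq (ice_area : List (List Int)) (n : Int) (hm : Int) (divide_len : List Int)
    (hn : 0 ≤ n) (hdl : ∀ dl ∈ divide_len, 0 ≤ dl ∧ dl ≤ n) :
    firestorm ice_area n hm divide_len = divide_len.foldl (roundG n) ice_area := by
  unfold firestorm
  apply PySem.List.foldl_congr_mem
  intro acc x hx
  obtain ⟨h0, h1⟩ := hdl x hx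
  unfold roundG
  rw [rot_eq hn h0 h1 acc]
  exact melt_eq (Sh_map_map (by unfold pow2; positivity) _)

-- ===== the dict side =====

-- the invariant: the dict holds exactly the in-range cells of the grid G that are nonzero
def CellsOK (size : Int) (G : List (List Int)) (d : PySem.Dict (Int × Int) Int) : Prop :=
  d.keys.Nodup ∧ ∀ (p : Int × Int) (v : Int),
    ((p, v) ∈ d.items ↔ InR size p.1 p.2 ∧ v = gget G p.1 p.2 ∧ v ≠ 0)

theorem dictOfPairs_items {l : List ((Int × Int) × Int)} (hnd : (l.map Prod.fst).Nodup) :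
    (dictOfPairs l).items = l ∧ (dictOfPairs l).keys.Nodup := by
  have h := PySem.Dict.items_foldl_insert_fresh (d := PySem.Dict.empty)
    (k := (Prod.fst : (Int × Int) × Int → Int × Int)) (v := Prod.snd) (l := l)
    (fun a _ => PySem.Dict.contains_empty _) hnd
  have hitems : (dictOfPairs l).items = l := by
    unfold dictOfPairs
    rw [show (fun (d : PySem.Dict (Int × Int) Int) (a : (Int × Int) × Int) => d.insert a.1 a.2)
        = (fun d a => d.insert (Prod.fst a) (Prod.snd a)) from rfl, h,
        show (PySem.Dict.empty : PySem.Dict (Int × Int) Int).items = [] from rfl]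
    simp
  refine ⟨hitems, ?_⟩
  show ((dictOfPairs l).items.map Prod.fst).Nodup
  rw [hitems]; exact hnd

theorem cellsOK_contains {size : Int} {G : List (List Int)} {d : PySem.Dict (Int × Int) Int}
    (h : CellsOK size G d) (p : Int × Int) :
    d.contains p = decide (0 ≤ p.1 ∧ p.1 < size ∧ 0 ≤ p.2 ∧ p.2 < size ∧ gget G p.1 p.2 ≠ 0) := by
  by_cases hc : InR size p.1 p.2 ∧ gget G p.1 p.2 ≠ 0
  · have hmem : p ∈ d.keys :=
      List.mem_map.2 ⟨(p, gget G p.1 p.2), (h.2 p _).2 ⟨hc.1, rfl, hc.2⟩, rfl⟩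
    rw [(PySem.Dict.contains_iff_mem_keys d p).2 hmem]
    obtain ⟨⟨a1, a2, a3, a4⟩, a5⟩ := hc
    simp [a1, a2, a3, a4, a5]
  · have hmem : p ∉ d.keys := by
      intro hk
      obtain ⟨pv, hm, rfl⟩ := List.mem_map.1 hk
      obtain ⟨hin, hv, hnz⟩ := (h.2 pv.1 pv.2).1 (by rw [Prod.mk.eta]; exact hm)
      exact hc ⟨hin, hv ▸ hnz⟩
    have hfalse : d.contains p = false := by
      cases hb : d.contains p
      · rfl
      · exact absurd ((PySem.Dict.contains_iff_mem_keys d p).1 hb) hmem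
    rw [hfalse]
    have hneg : ¬ (0 ≤ p.1 ∧ p.1 < size ∧ 0 ≤ p.2 ∧ p.2 < size ∧ gget G p.1 p.2 ≠ 0) := by
      intro ⟨a1, a2, a3, a4, a5⟩; exact hc ⟨⟨a1, a2, a3, a4⟩, a5⟩
    simp [hneg]

theorem cellsOK_getD {size : Int} {G : List (List Int)} {d : PySem.Dict (Int × Int) Int}
    (h : CellsOK size G d) {p : Int × Int} (hin : InR size p.1 p.2) :
    d.getD p 0 = gget G p.1 p.2 := by
  by_cases hz : gget G p.1 p.2 = 0
  · have hnc : d.contains p = false := by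
      rw [cellsOK_contains h]
      simp [hz]
    rw [PySem.Dict.getD_of_not_contains _ _ hnc, hz]
  · exact PySem.Dict.getD_of_mem_items d ((h.2 p _).2 ⟨hin, rfl, hz⟩) h.1 0

-- build
theorem build_ok (area : List (List Int)) {size : Int} (hs : 0 ≤ size) :
    CellsOK size area (buildCells area size) := by
  set l := (((PySem.List.pyRange 0 size 1) ×ˢ (PySem.List.pyRange 0 size 1)).map
      (fun p => (p, gget area p.1 p.2))).filter (fun a => a.2 != 0) with hl
  have hnd : (l.map Prod.fst).Nodup := by
    have hsub : (l.map Prod.fst).Sublist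
        ((((PySem.List.pyRange 0 size 1) ×ˢ (PySem.List.pyRange 0 size 1)).map
          (fun p => (p, gget area p.1 p.2))).map Prod.fst) :=
      List.Sublist.map _ List.filter_sublist
    have hmap : (((PySem.List.pyRange 0 size 1) ×ˢ (PySem.List.pyRange 0 size 1)).map
          (fun p => (p, gget area p.1 p.2))).map Prod.fst
        = (PySem.List.pyRange 0 size 1) ×ˢ (PySem.List.pyRange 0 size 1) := by
      rw [List.map_map]; exact List.map_id _
    rw [hmap] at hsub
    exact List.Nodup.sublist hsub
      (List.Nodup.product (nodup_pyRange_zero size) (nodup_pyRange_zero size))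
  obtain ⟨hitems, hkeys⟩ := dictOfPairs_items hnd
  have hB : buildCells area size = dictOfPairs l := rfl
  refine ⟨by rw [hB]; exact hkeys, ?_⟩
  intro p v
  rw [hB, hitems, hl, List.mem_filter, List.mem_map]
  constructor
  · rintro ⟨⟨⟨x, y⟩, hq, he⟩, hnz⟩
    obtain ⟨rfl, rfl⟩ := Prod.ext_iff.1 he
    obtain ⟨hx, hy⟩ := List.pair_mem_product.1 hq
    obtain ⟨hx0, hx1⟩ := PySem.List.mem_pyRange_one.1 hx
    obtain ⟨hy0, hy1⟩ := PySem.List.mem_pyRange_one.1 hy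
    exact ⟨⟨hx0, hx1, hy0, hy1⟩, rfl, by simpa using hnz⟩
  · rintro ⟨⟨hx0, hx1, hy0, hy1⟩, rfl, hnz⟩
    refine ⟨⟨p, ?_, rfl⟩, by simpa using hnz⟩
    have hm := List.pair_mem_product.2 ⟨PySem.List.mem_pyRange_one.2 ⟨hx0, hx1⟩,
      PySem.List.mem_pyRange_one.2 ⟨hy0, hy1⟩⟩
    rwa [Prod.mk.eta] at hm

-- the coordinate maps are mutually inverse and preserve the board
theorem block_bound {L size a r : Int} (hL : 0 < L) (hdvd : L ∣ size)
    (ha0 : 0 ≤ a) (ha1 : a < size) (hr0 : 0 ≤ r) (hr1 : r < L) :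
    0 ≤ PySem.Int.floordiv a L * L + r ∧ PySem.Int.floordiv a L * L + r < size := by
  have hbase := PySem.Int.floordiv_mul_add_mod a L
  have hm0 := PySem.Int.mod_nonneg a hL
  have hm1 := PySem.Int.mod_lt a hL
  have hd0 : 0 ≤ PySem.Int.floordiv a L := by
    rw [PySem.Int.floordiv_eq_ediv_of_pos hL]; exact Int.ediv_nonneg ha0 (by omega)
  have hA0 : 0 ≤ PySem.Int.floordiv a L * L := by positivity
  have hstep : PySem.Int.floordiv a L * L + L ≤ size := by
    have hdv : L ∣ size - PySem.Int.floordiv a L * L :=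
      dvd_sub hdvd ⟨PySem.Int.floordiv a L, mul_comm _ _⟩
    have := Int.le_of_dvd (by omega) hdv
    omega
  omega

theorem bwd_fwd {L : Int} (hL : 0 < L) (p : Int × Int) : bwdKey L (fwdKey L p) = p := by
  obtain ⟨a, b⟩ := p
  have hma0 := PySem.Int.mod_nonneg a hL
  have hma1 := PySem.Int.mod_lt a hL
  have hmb0 := PySem.Int.mod_nonneg b hL
  have hmb1 := PySem.Int.mod_lt b hL
  obtain ⟨hf1, hm1⟩ := md_fd hL (⟨PySem.Int.floordiv a L, mul_comm _ _⟩ :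
      L ∣ PySem.Int.floordiv a L * L) hmb0 hmb1
  obtain ⟨hf2, hm2⟩ := md_fd hL (⟨PySem.Int.floordiv b L, mul_comm _ _⟩ :
      L ∣ PySem.Int.floordiv b L * L)
    (by omega : (0:Int) ≤ L - 1 - PySem.Int.mod a L) (by omega : L - 1 - PySem.Int.mod a L < L)
  have hea := PySem.Int.floordiv_mul_add_mod a L
  have heb := PySem.Int.floordiv_mul_add_mod b L
  unfold fwdKey bwdKey
  simp only
  have h2 : PySem.Int.floordiv b L * L + L - 1 - PySem.Int.mod a L
      = PySem.Int.floordiv b L * L + (L - 1 - PySem.Int.mod a L) := by ring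
  rw [h2, hf1, hm1, hf2, hm2]
  exact Prod.ext (by omega) (by omega)

theorem fwd_bwd {L : Int} (hL : 0 < L) (p : Int × Int) : fwdKey L (bwdKey L p) = p := by
  obtain ⟨a, b⟩ := p
  have hma0 := PySem.Int.mod_nonneg a hL
  have hma1 := PySem.Int.mod_lt a hL
  have hmb0 := PySem.Int.mod_nonneg b hL
  have hmb1 := PySem.Int.mod_lt b hL
  obtain ⟨hf1, hm1⟩ := md_fd hL (⟨PySem.Int.floordiv a L, mul_comm _ _⟩ :
      L ∣ PySem.Int.floordiv a L * L)
    (by omega : (0:Int) ≤ L - 1 - PySem.Int.mod b L) (by omega : L - 1 - PySem.Int.mod b L < L)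
  obtain ⟨hf2, hm2⟩ := md_fd hL (⟨PySem.Int.floordiv b L, mul_comm _ _⟩ :
      L ∣ PySem.Int.floordiv b L * L) hma0 hma1
  have hea := PySem.Int.floordiv_mul_add_mod a L
  have heb := PySem.Int.floordiv_mul_add_mod b L
  unfold fwdKey bwdKey
  simp only
  have h1 : PySem.Int.floordiv a L * L + L - 1 - PySem.Int.mod b L
      = PySem.Int.floordiv a L * L + (L - 1 - PySem.Int.mod b L) := by ring
  rw [h1, hf1, hm1, hf2, hm2]
  exact Prod.ext (by omega) (by omega)

theorem fwd_injective {L : Int} (hL : 0 < L) : Function.Injective (fwdKey L) :=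
  Function.LeftInverse.injective (g := bwdKey L) (bwd_fwd hL)

theorem fwd_inR {L size : Int} (hL : 0 < L) (hdvd : L ∣ size) {p : Int × Int}
    (h : InR size p.1 p.2) : InR size (fwdKey L p).1 (fwdKey L p).2 := by
  obtain ⟨ha0, ha1, hb0, hb1⟩ := h
  have hma0 := PySem.Int.mod_nonneg p.1 hL
  have hma1 := PySem.Int.mod_lt p.1 hL
  have hmb0 := PySem.Int.mod_nonneg p.2 hL
  have hmb1 := PySem.Int.mod_lt p.2 hL
  obtain ⟨h1, h2⟩ := block_bound hL hdvd ha0 ha1 hmb0 hmb1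
  obtain ⟨h3, h4⟩ := block_bound hL hdvd hb0 hb1
    (by omega : (0:Int) ≤ L - 1 - PySem.Int.mod p.1 L) (by omega : L - 1 - PySem.Int.mod p.1 L < L)
  unfold fwdKey
  exact ⟨h1, h2, by omega, by omega⟩

theorem bwd_inR {L size : Int} (hL : 0 < L) (hdvd : L ∣ size) {p : Int × Int}
    (h : InR size p.1 p.2) : InR size (bwdKey L p).1 (bwdKey L p).2 := by
  obtain ⟨ha0, ha1, hb0, hb1⟩ := h
  have hma0 := PySem.Int.mod_nonneg p.1 hL
  have hma1 := PySem.Int.mod_lt p.1 hL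
  have hmb0 := PySem.Int.mod_nonneg p.2 hL
  have hmb1 := PySem.Int.mod_lt p.2 hL
  obtain ⟨h1, h2⟩ := block_bound hL hdvd ha0 ha1
    (by omega : (0:Int) ≤ L - 1 - PySem.Int.mod p.2 L) (by omega : L - 1 - PySem.Int.mod p.2 L < L)
  obtain ⟨h3, h4⟩ := block_bound hL hdvd hb0 hb1 hma0 hma1
  unfold bwdKey
  exact ⟨by omega, by omega, h3, h4⟩

theorem gget_rotAlt {size L : Int} (G : List (List Int)) {p : Int × Int}
    (h : InR size p.1 p.2) :
    gget (rotAlt G size L) p.1 p.2 = gget G (bwdKey L p).1 (bwdKey L p).2 := by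
  unfold rotAlt
  have he := gget_map_map (f := fun x y => gget G (bwdKey L (x, y)).1 (bwdKey L (x, y)).2) h
  rw [he]

theorem gget_meltAlt {size : Int} (R : List (List Int)) {p : Int × Int}
    (h : InR size p.1 p.2) :
    gget (meltAlt R size) p.1 p.2
      = if gget R p.1 p.2 ≠ 0 ∧ cntAlt R size p.1 p.2 < 3
        then gget R p.1 p.2 - 1 else gget R p.1 p.2 := by
  unfold meltAlt
  have he := gget_map_map (f := fun x y => if gget R x y ≠ 0 ∧ cntAlt R size x y < 3
      then gget R x y - 1 else gget R x y) h
  rw [he]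

-- the rotation step on the dict
theorem rot_ok {size L : Int} {G : List (List Int)} {d : PySem.Dict (Int × Int) Int}
    (h : CellsOK size G d) (hL : 0 < L) (hdvd : L ∣ size) :
    CellsOK size (rotAlt G size L)
      (dictOfPairs (d.items.map (fun a => (fwdKey L a.1, a.2)))) := by
  set lrot := d.items.map (fun a => (fwdKey L a.1, a.2)) with hlrot
  have hnd : (lrot.map Prod.fst).Nodup := by
    rw [hlrot, List.map_map]
    have he : (Prod.fst ∘ fun a : (Int × Int) × Int => (fwdKey L a.1, a.2))
        = fwdKey L ∘ Prod.fst := rfl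
    rw [he, ← List.map_map]
    exact List.Nodup.map (fwd_injective hL) h.1
  obtain ⟨hitems, hkeys⟩ := dictOfPairs_items hnd
  refine ⟨hkeys, ?_⟩
  intro q v
  rw [hitems, hlrot, List.mem_map]
  constructor
  · rintro ⟨a, hm, he⟩
    obtain ⟨rfl, rfl⟩ := Prod.ext_iff.1 he
    obtain ⟨hin, hv, hnz⟩ := (h.2 a.1 a.2).1 (Prod.mk.eta ▸ hm)
    have hinq := fwd_inR hL hdvd hin
    refine ⟨hinq, ?_, hnz⟩
    rw [gget_rotAlt G hinq, bwd_fwd hL a.1, hv]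
  · rintro ⟨hinq, rfl, hnz⟩
    have hnz' : gget G (bwdKey L q).1 (bwdKey L q).2 ≠ 0 := by
      rwa [gget_rotAlt G hinq] at hnz
    refine ⟨(bwdKey L q, gget G (bwdKey L q).1 (bwdKey L q).2), ?_, ?_⟩
    · exact (h.2 _ _).2 ⟨bwd_inR hL hdvd hinq, rfl, hnz'⟩
    · rw [Prod.ext_iff]
      exact ⟨fwd_bwd hL q, (gget_rotAlt G hinq).symm⟩

theorem meltCnt_eq {size : Int} {R : List (List Int)} {rot : PySem.Dict (Int × Int) Int}
    (h : CellsOK size R rot) (p : Int × Int) :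
    meltCnt rot p = cntAlt R size p.1 p.2 := by
  unfold meltCnt cntAlt
  congr 1
  apply List.countP_congr
  intro q _
  rw [cellsOK_contains h q]

-- the melt step on the dict
theorem melt_ok {size : Int} {R : List (List Int)} {rot : PySem.Dict (Int × Int) Int}
    (h : CellsOK size R rot) :
    CellsOK size (meltAlt R size)
      (dictOfPairs ((rot.items.map
        (fun a => (a.1, if meltCnt rot a.1 < 3 then a.2 - 1 else a.2))).filter
        (fun a => a.2 != 0))) := by
  set lm := (rot.items.map
      (fun a => (a.1, if meltCnt rot a.1 < 3 then a.2 - 1 else a.2))).filter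
      (fun a => a.2 != 0) with hlm
  have hnd : (lm.map Prod.fst).Nodup := by
    have hsub : (lm.map Prod.fst).Sublist
        ((rot.items.map (fun a => (a.1, if meltCnt rot a.1 < 3 then a.2 - 1 else a.2))).map Prod.fst) :=
      List.Sublist.map _ List.filter_sublist
    have hmap : ((rot.items.map
          (fun a => (a.1, if meltCnt rot a.1 < 3 then a.2 - 1 else a.2))).map Prod.fst)
        = rot.items.map Prod.fst := by
      rw [List.map_map]; rfl
    rw [hmap] at hsub
    exact List.Nodup.sublist hsub h.1
  obtain ⟨hitems, hkeys⟩ := dictOfPairs_items hnd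
  refine ⟨hkeys, ?_⟩
  intro q w
  rw [hitems, hlm, List.mem_filter, List.mem_map]
  constructor
  · rintro ⟨⟨a, hm, he⟩, hnz⟩
    obtain ⟨rfl, rfl⟩ := Prod.ext_iff.1 he
    obtain ⟨hin, hv, hvnz⟩ := (h.2 a.1 a.2).1 (Prod.mk.eta ▸ hm)
    refine ⟨hin, ?_, by simpa using hnz⟩
    rw [gget_meltAlt R hin, meltCnt_eq h a.1, ← hv]
    exact if_congr (and_iff_right hvnz).symm rfl rfl
  · rintro ⟨hin, rfl, hnz⟩
    have hRnz : gget R q.1 q.2 ≠ 0 := by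
      intro h0
      rw [gget_meltAlt R hin, h0] at hnz
      simp at hnz
    refine ⟨⟨(q, gget R q.1 q.2), (h.2 q _).2 ⟨hin, rfl, hRnz⟩, ?_⟩, by simpa using hnz⟩
    rw [Prod.ext_iff]
    refine ⟨rfl, ?_⟩
    show (if meltCnt rot q < 3 then gget R q.1 q.2 - 1 else gget R q.1 q.2)
        = gget (meltAlt R size) q.1 q.2
    rw [gget_meltAlt R hin, meltCnt_eq h q]
    exact if_congr (and_iff_right hRnz).symm rfl rfl

-- one round
theorem round_ok {size : Int} {G : List (List Int)} {d : PySem.Dict (Int × Int) Int}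
    (h : CellsOK size G d) {n dl : Int} (hn : 0 ≤ n) (h0 : 0 ≤ dl) (h1 : dl ≤ n)
    (hsz : size = pow2 n) :
    CellsOK size (roundG n G dl) (roundD d dl) := by
  have hL : 0 < pow2 dl := by unfold pow2; positivity
  have hdvd : pow2 dl ∣ size := by
    rw [hsz]; exact pow_dvd_pow 2 (by omega : dl.toNat ≤ n.toNat)
  have hrot := rot_ok h hL hdvd
  have hmelt := melt_ok hrot
  unfold roundD roundG
  rw [← hsz]
  exact hmelt

theorem cells_fold_ok {size : Int} {n : Int} (hn : 0 ≤ n) (hsz : size = pow2 n) :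
    ∀ (dls : List Int) (G : List (List Int)) (d : PySem.Dict (Int × Int) Int),
      CellsOK size G d → (∀ dl ∈ dls, 0 ≤ dl ∧ dl ≤ n) →
      CellsOK size (dls.foldl (roundG n) G) (dls.foldl roundD d) := by
  intro dls
  induction dls with
  | nil => intro G d h _; exact h
  | cons dl rest ih =>
    intro G d h hb
    have hdl := hb dl (by simp)
    exact ih _ _ (round_ok h hn hdl.1 hdl.2 hsz) (fun z hz => hb z (List.mem_cons_of_mem _ hz))

theorem Sh_foldl_roundG (n : Int) :
    ∀ (dls : List Int) (G : List (List Int)), dls ≠ [] →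
      Sh (dls.foldl (roundG n) G) (pow2 n) := by
  intro dls
  induction dls with
  | nil => intro G h; exact absurd rfl h
  | cons dl rest ih =>
    intro G _
    rw [List.foldl_cons]
    cases rest with
    | nil =>
      show Sh (roundG n G dl) (pow2 n)
      unfold roundG meltAlt
      exact Sh_map_map (by unfold pow2; positivity) _
    | cons r rs => exact ih _ (by simp)

-- ===== VERDICT (by name: the statement is the Claim_ definition above) =====
theorem firestorm_spec : Claim_equal_firestorm := by
  intro ice_area n how_many_fs divide_len _ hPre
  show firestorm ice_area n how_many_fs divide_len = firestorm_alt ice_area n how_many_fs divide_len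
  rcases hPre with hnil | ⟨hn, _, hdl, _⟩
  · subst hnil; rfl
  · by_cases hemp : divide_len = []
    · subst hemp; rfl
    · rw [firestorm_eq ice_area n how_many_fs divide_len hn hdl]
      unfold firestorm_alt
      rw [if_neg hemp]
      have hs0 : (0:Int) ≤ pow2 n := by unfold pow2; positivity
      have hfin := cells_fold_ok hn rfl divide_len ice_area (buildCells ice_area (pow2 n))
        (build_ok ice_area hs0) hdl
      have hShG := Sh_foldl_roundG n divide_len ice_area hemp
      apply grid_ext hShG (Sh_map_map hs0 _)
      intro p q hin
      rw [gget_map_map (f := fun x y =>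
        (divide_len.foldl roundD (buildCells ice_area (pow2 n))).getD (x, y) 0) hin]
      exact (cellsOK_getD (p := (p, q)) hfin hin).symm
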